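-- pv_equiv track=rewrite | github.com/sreekarvjenr/JPEG-compression | Code/new.py | run_length_encode
-- ===== SOURCE A (Python) =====
-- def run_length_encode(ac_coefficients):
--     rle = []
--     zero_count = 0
--     for coeff in ac_coefficients:
--         if coeff == 0:
--             zero_count += 1
--         else:
--             while zero_count > 15:
--                 rle.append(('AC', 15, 0))
--                 zero_count -= 16
--             rle.append(('AC', zero_count, coeff))
--             zero_count = 0
--     if zero_count > 0:
--         rle.append(('AC', 0, 0))  # End of Block
--     return rle
-- ===== SOURCE B (Python) =====
-- def run_length_encode(ac_coefficients):
--     coeffs = list(ac_coefficients)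
--     nonzero = [(i, c) for i, c in enumerate(coeffs) if c != 0]
--     rle = []
--     prev = -1
--     for i, c in nonzero:
--         runs, rem = divmod(i - prev - 1, 16)
--         rle.extend([('AC', 15, 0)] * runs)
--         rle.append(('AC', rem, c))
--         prev = i
--     if prev < len(coeffs) - 1:
--         rle.append(('AC', 0, 0))
--     return rle
-- ===== Notes on version B (the rewrite author's own statement) =====
-- stated objective: alternative
-- what changed: B precomputes the list of (index, value) pairs of nonzero coefficients and drives the output from the index gaps via divmod(gap,16), replacing A's stateful running zero-counter and inner while loop; End-of-Block is decided by comparing the last nonzero index with the list length.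
import Mathlib
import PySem

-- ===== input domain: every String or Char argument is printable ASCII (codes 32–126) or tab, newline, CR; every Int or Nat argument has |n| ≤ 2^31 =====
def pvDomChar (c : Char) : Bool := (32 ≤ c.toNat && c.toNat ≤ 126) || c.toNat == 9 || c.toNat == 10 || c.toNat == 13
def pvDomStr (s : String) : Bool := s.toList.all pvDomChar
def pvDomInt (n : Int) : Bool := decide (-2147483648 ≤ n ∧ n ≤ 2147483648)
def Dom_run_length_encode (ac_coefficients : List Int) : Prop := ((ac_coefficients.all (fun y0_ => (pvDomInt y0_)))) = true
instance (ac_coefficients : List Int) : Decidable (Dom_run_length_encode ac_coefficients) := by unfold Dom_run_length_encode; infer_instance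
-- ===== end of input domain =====

-- B drives the output from a precomputed (index, value) list of nonzero coefficients
-- using divmod on index gaps, instead of A's running zero-counter with an inner while loop
-- (alternative decomposition; same asymptotic cost).


-- ===== PORT A =====
-- the inner 'while zero_count > 15' loop of A (zero_count is a running count, hence Nat)
def pvEmitZeros (rle : List (String × Int × Int)) (z : Nat) : List (String × Int × Int) × Nat :=
  if z > 15 then pvEmitZeros (rle ++ [("AC", 15, 0)]) (z - 16) else (rle, z)
termination_by z

-- one iteration of A's for-loop over (rle, zero_count)
def pvStepA (st : List (String × Int × Int) × Nat) (coeff : Int) : List (String × Int × Int) × Nat :=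
  if coeff = 0 then (st.1, st.2 + 1)
  else
    let p := pvEmitZeros st.1 st.2
    (p.1 ++ [("AC", (p.2 : Int), coeff)], 0)

def run_length_encode (ac_coefficients : List Int) : List (String × Int × Int) :=
  let st := ac_coefficients.foldl pvStepA ([], 0)
  if st.2 > 0 then st.1 ++ [("AC", 0, 0)] else st.1

-- ===== PORT B =====
-- one iteration of B's for-loop over (rle, prev); p = (i, c) a nonzero entry
def pvStepB (st : List (String × Int × Int) × Int) (p : Int × Int) : List (String × Int × Int) × Int :=
  let gap := p.1 - st.2 - 1
  let runs := PySem.Int.floordiv gap 16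
  let rem := PySem.Int.mod gap 16
  (st.1 ++ List.replicate runs.toNat ("AC", 15, 0) ++ [("AC", rem, p.2)], p.1)

def run_length_encode_alt (ac_coefficients : List Int) : List (String × Int × Int) :=
  let coeffs := ac_coefficients
  let nonzero := (PySem.List.enumerate coeffs 0).filter (fun p => p.2 != 0)
  let st := nonzero.foldl pvStepB ([], -1)
  if st.2 < (coeffs.length : Int) - 1 then st.1 ++ [("AC", 0, 0)] else st.1

-- ===== PRECONDITION & SPEC =====
def Spec_run_length_encode (ac_coefficients : List Int) (out : List (String × Int × Int)) : Prop := out = run_length_encode_alt ac_coefficients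
instance (ac_coefficients : List Int) (out : List (String × Int × Int)) : Decidable (Spec_run_length_encode ac_coefficients out) := by unfold Spec_run_length_encode; infer_instance

-- ===== CLAIM (what is proved, stated in full; the proofs are below) =====
def Claim_equal_run_length_encode : Prop := ∀ (ac_coefficients : List Int), Dom_run_length_encode ac_coefficients → Spec_run_length_encode ac_coefficients (run_length_encode ac_coefficients)

-- ===== LEMMAS AND PROOFS =====

-- A's while loop emits ⌊z/16⌋ fifteen-zero runs and leaves z % 16
theorem pvEmitZeros_eq (rle : List (String × Int × Int)) (z : Nat) :
    pvEmitZeros rle z = (rle ++ List.replicate (z / 16) ("AC", 15, 0), z % 16) := by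
  induction rle, z using pvEmitZeros.induct with
  | case1 rle z h ih =>
      rw [pvEmitZeros, if_pos h, ih]
      have h1 : z / 16 = (z - 16) / 16 + 1 := by omega
      have h2 : z % 16 = (z - 16) % 16 := by omega
      rw [h1, ← h2, List.replicate_succ]
      simp
  | case2 rle z h =>
      rw [pvEmitZeros, if_neg h]
      have : z / 16 = 0 := by omega
      simp [this, Nat.mod_eq_of_lt (by omega : z < 16)]

-- main invariant: A's loop from (rle, z) agrees with B's loop over the nonzero entries of
-- enumerate-from-n, from (rle, n - 1 - z), where n - 1 - z is the last nonzero position.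
theorem pvKey (l : List Int) (n : Int) (rle : List (String × Int × Int)) (z : Nat) :
    (let st := l.foldl pvStepA (rle, z)
     if st.2 > 0 then st.1 ++ [("AC", 0, 0)] else st.1)
    = (let st := ((PySem.List.enumerate l n).filter (fun p => p.2 != 0)).foldl pvStepB (rle, n - 1 - (z : Int))
       if st.2 < n + (l.length : Int) - 1 then st.1 ++ [("AC", 0, 0)] else st.1) := by
  induction l generalizing n rle z with
  | nil =>
      simp only [List.foldl_nil, PySem.List.enumerate_nil, List.filter_nil, List.length_nil,
        Nat.cast_zero]
      have h : (n - 1 - (z : Int) < n + 0 - 1) ↔ (0 < z) := by omega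
      by_cases hz : 0 < z
      · rw [if_pos hz, if_pos (h.mpr hz)]
      · rw [if_neg hz, if_neg (fun hh => hz (h.mp hh))]
  | cons c l ih =>
      rw [PySem.List.enumerate_cons]
      by_cases hc : c = 0
      · subst hc
        simp only [List.foldl_cons, pvStepA, List.filter_cons]
        norm_num
        have := ih (n + 1) rle (z + 1)
        have harg : (n + 1 : Int) - 1 - ((z + 1 : Nat) : Int) = n - 1 - (z : Int) := by
          push_cast; ring
        rw [harg] at this
        rw [this]
        have hlen : (n + 1) + (l.length : Int) - 1 = n + ((l.length : Int) + 1) - 1 := by ring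
        rw [← hlen]
      · simp only [List.foldl_cons, pvStepA, if_neg hc, pvEmitZeros_eq, List.filter_cons]
        have hb : ((n, c).2 != 0) = true := by simpa using hc
        rw [if_pos hb, List.foldl_cons]
        have hstep : pvStepB (rle, n - 1 - (z : Int)) (n, c)
            = (rle ++ List.replicate (z / 16) ("AC", 15, 0) ++ [("AC", ((z % 16 : Nat) : Int), c)], n) := by
          simp only [pvStepB]
          have hgap : n - (n - 1 - (z : Int)) - 1 = ((z : Nat) : Int) := by ring
          rw [hgap]
          have hdiv : PySem.Int.floordiv ((z : Nat) : Int) 16 = ((z / 16 : Nat) : Int) := by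
            exact_mod_cast PySem.Int.floordiv_natCast z 16
          have hmod : PySem.Int.mod ((z : Nat) : Int) 16 = ((z % 16 : Nat) : Int) := by
            exact_mod_cast PySem.Int.mod_natCast z 16
          rw [hdiv, hmod, Int.toNat_natCast]
        rw [hstep]
        have := ih (n + 1) (rle ++ List.replicate (z / 16) ("AC", 15, 0) ++ [("AC", ((z % 16 : Nat) : Int), c)]) 0
        have harg : (n + 1 : Int) - 1 - ((0 : Nat) : Int) = n := by norm_num
        rw [harg] at this
        simp only [List.append_assoc] at this ⊢
        rw [this]
        have hlen : (n + 1) + (l.length : Int) - 1 = n + ((l.length : Int) + 1) - 1 := by ring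
        rw [List.length_cons]
        push_cast
        rw [← hlen]

-- ===== VERDICT (by name: the statement is the Claim_ definition above) =====
theorem run_length_encode_spec : Claim_equal_run_length_encode := by
  intro ac _
  unfold Spec_run_length_encode run_length_encode run_length_encode_alt
  have := pvKey ac 0 [] 0
  simpa using this
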